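-- pv_equiv track=rewrite | github.com/Megatvini/InformationTheory | Assignment2/src/Distrib.py | count_distribution
-- ===== SOURCE A (Python) =====
-- from collections import Counter
--
-- def count_line_distribution(line, last_letter=''):
--     letter_counts = Counter()
--     for ch in line:
--         letter_counts[ch] += 1
--         if last_letter is not None and last_letter != '':
--             letter_counts[last_letter + ch] += 1
--         last_letter = ch
--     return letter_counts
--
-- def count_distribution(inp):
--     letter_counts = Counter()
--     last_letter = None
--     for line in inp:
--         line_letter_counts = count_line_distribution(line, last_letter)
--         letter_counts += line_letter_counts
--         last_letter = line[len(line) - 1]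
--     return letter_counts
-- ===== SOURCE B (Python) =====
-- from collections import Counter
--
-- def count_distribution(inp):
--     s = ''.join(inp)
--     counts = Counter()
--     for prev, ch in zip([None] + list(s), s):
--         counts[ch] += 1
--         if prev is not None:
--             counts[prev + ch] += 1
--     return counts
-- ===== Notes on version B (the rewrite author's own statement) =====
-- stated objective: simpler
-- what changed: A builds a separate Counter per line with a nested helper loop and merges it into the running total with Counter += while threading the previous line's last letter; B joins all lines into one text and tallies letters and adjacent bigrams in a single flat pass over (prev, ch) pairs, with no per-line Counters and no merging. (no per-line Counter objects and no Counter-merge scans, a constant-factor saving a timing run measured).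
-- crash fix: A raises IndexError (line[len(line)-1]) whenever the input contains an empty line; B ignores empty lines (they contribute no characters to the joined text) and returns the counts of the remaining text. — e.g. on count_distribution(["", "a"]): A raises IndexError, B returns [("a", 1)]
import Mathlib
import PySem

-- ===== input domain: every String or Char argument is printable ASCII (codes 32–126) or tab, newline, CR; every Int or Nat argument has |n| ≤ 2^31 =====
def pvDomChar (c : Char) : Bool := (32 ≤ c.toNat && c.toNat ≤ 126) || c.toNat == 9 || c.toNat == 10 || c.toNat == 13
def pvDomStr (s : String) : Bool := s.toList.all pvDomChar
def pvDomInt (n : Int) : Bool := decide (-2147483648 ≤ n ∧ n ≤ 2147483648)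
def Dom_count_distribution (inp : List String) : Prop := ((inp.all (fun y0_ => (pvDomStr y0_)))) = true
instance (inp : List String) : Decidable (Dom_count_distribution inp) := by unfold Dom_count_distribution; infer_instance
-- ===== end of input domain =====

-- B replaces A's per-line Counter + Counter-merge (+ last-letter carry via indexing) by a single
-- counting pass over the joined text; equivalence is about the returned Counter (no mutation).

-- ===== PORT A =====
-- helper count_line_distribution(line, last_letter): last_letter is None or a string (Option String).
-- Counter[k] += 1 is Dict.modify k 0 (·+1); string concatenation done on toList (kernel-transparent).
def count_line_distribution (line : String) (last_letter : Option String) : PySem.Dict String Int :=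
  (line.toList.foldl
    (fun (st : PySem.Dict String Int × Option String) ch =>
      let d1 := st.1.modify (String.ofList [ch]) 0 (· + 1)
      let d2 := match st.2 with
        | none => d1
        | some ll => if ll = "" then d1 else d1.modify (String.ofList (ll.toList ++ [ch])) 0 (· + 1)
      (d2, some (String.ofList [ch])))
    (PySem.Dict.empty, last_letter)).1

-- Counter.__iadd__: for each (k, v) of the right counter in order, self[k] = self.get(k, 0) + v
-- (the _keep_positive sweep is the identity here: every count involved is positive).
def count_distribution (inp : List String) : List (String × Int) :=
  (inp.foldl
    (fun (st : PySem.Dict String Int × Option String) line =>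
      let lc := count_line_distribution line st.2
      let merged := lc.items.foldl (fun d kv => d.insert kv.1 (d.getD kv.1 0 + kv.2)) st.1
      -- last_letter = line[len(line) - 1]  (IndexError on an empty line: none, excluded by Pre_)
      (merged, (PySem.Str.pyGet? line (PySem.Str.len line - 1)).map (fun c => String.ofList [c])))
    (PySem.Dict.empty, none)).1.items

-- ===== PORT B =====
def count_distribution_alt (inp : List String) : List (String × Int) :=
  let s := (PySem.Str.join "" inp).toList
  let pairs := List.zip (none :: s.map some) s
  (pairs.foldl
    (fun (d : PySem.Dict String Int) pc =>
      let d1 := d.modify (String.ofList [pc.2]) 0 (· + 1)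
      match pc.1 with
      | none => d1
      | some p => d1.modify (String.ofList [p, pc.2]) 0 (· + 1))
    PySem.Dict.empty).items

-- ===== PRECONDITION & SPEC =====
-- Pre_ excludes inputs containing an empty line: there A raises IndexError (line[len(line)-1]).
def Pre_count_distribution (inp : List String) : Prop := ∀ l ∈ inp, l.toList ≠ []
instance (inp : List String) : Decidable (Pre_count_distribution inp) := by unfold Pre_count_distribution; infer_instance
def pvWitness_count_distribution : List String := ["ab", "ba"]

-- A raises IndexError exactly when some line is empty; B simply skips empty lines (they add no
-- characters to the joined text) and returns the counts of the remaining text.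
def Raises_count_distribution (inp : List String) : Prop := ∃ l ∈ inp, l.toList = []
instance (inp : List String) : Decidable (Raises_count_distribution inp) := by unfold Raises_count_distribution; infer_instance
def pvRaiseWitness_count_distribution : List String := ["", "a"]
def pvRaiseWitnessOut_count_distribution : List (String × Int) := [("a", 1)]

def Spec_count_distribution (inp : List String) (out : List (String × Int)) : Prop := out = count_distribution_alt inp
instance (inp : List String) (out : List (String × Int)) : Decidable (Spec_count_distribution inp out) := by unfold Spec_count_distribution; infer_instance

-- ===== CLAIM (what is proved, stated in full; the proofs are below) =====
def Claim_equal_count_distribution : Prop := ∀ (inp : List String), Dom_count_distribution inp → Pre_count_distribution inp → Spec_count_distribution inp (count_distribution inp)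
def Claim_raises_count_distribution : Prop := (∀ (inp : List String), Dom_count_distribution inp → Raises_count_distribution inp → ¬ Pre_count_distribution inp) ∧ (Dom_count_distribution (pvRaiseWitness_count_distribution) ∧ Raises_count_distribution (pvRaiseWitness_count_distribution) ∧ count_distribution_alt (pvRaiseWitness_count_distribution) = pvRaiseWitnessOut_count_distribution)

-- ===== LEMMAS AND PROOFS =====

-- The common currency: the stream of Counter-increment events ("bumps") both programs perform,
-- one letter event per character plus one bigram event per character with a predecessor.
def bump (d : PySem.Dict String Int) (k : String) : PySem.Dict String Int := d.modify k 0 (· + 1)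

def runE (d : PySem.Dict String Int) (es : List String) : PySem.Dict String Int := es.foldl bump d

def evts (p : Option Char) (cs : List Char) : List String :=
  match cs with
  | [] => []
  | c :: cs' =>
    (String.ofList [c] :: (match p with | some q => [String.ofList [q, c]] | none => [])) ++ evts (some c) cs'

theorem evts_append (cs ds : List Char) (p : Option Char) (h : cs ≠ []) :
    evts p (cs ++ ds) = evts p cs ++ evts (some (cs.getLast h)) ds := by
  induction cs generalizing p with
  | nil => exact absurd rfl h
  | cons c cs' ih =>
    cases cs' with
    | nil => cases p <;> simp [evts]
    | cons b t =>
      have hih := ih (p := some c) (by simp)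
      simp only [List.cons_append, evts] at hih ⊢
      rw [hih]
      simp [List.getLast]

theorem runE_append (d : PySem.Dict String Int) (e1 e2 : List String) :
    runE d (e1 ++ e2) = runE (runE d e1) e2 := List.foldl_append

theorem nodup_keys_runE (d : PySem.Dict String Int) (es : List String) (hd : d.keys.Nodup) :
    (runE d es).keys.Nodup := by
  have := PySem.Dict.nodup_keys_foldl_modify_key es (fun x => x) 0 (fun _ _ => (· + 1)) d hd
  simpa [runE, bump] using this

theorem keys_runE (d : PySem.Dict String Int) (es : List String) :
    (runE d es).keys = PySem.Set.update d.keys es := by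
  have := PySem.Dict.keys_foldl_modify (l := es) (d0 := (0 : Int)) (f := fun _ _ => (· + 1)) (d := d)
  simpa [runE, bump] using this

theorem getD_runE (d : PySem.Dict String Int) (es : List String) (v : String) :
    (runE d es).getD v 0 = d.getD v 0 + es.count v := by
  have := PySem.Dict.getD_foldl_modify_add_one (l := es) (d := d) (v := v)
  simpa [runE, bump] using this

-- A's inner loop produces exactly the bumps of `evts` (first component of its state).
theorem foldA_eval (cs : List Char) (d : PySem.Dict String Int) (p : Option Char) :
    (cs.foldl
      (fun (st : PySem.Dict String Int × Option String) ch =>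
        let d1 := st.1.modify (String.ofList [ch]) 0 (· + 1)
        let d2 := match st.2 with
          | none => d1
          | some ll => if ll = "" then d1 else d1.modify (String.ofList (ll.toList ++ [ch])) 0 (· + 1)
        (d2, some (String.ofList [ch])))
      (d, p.map (fun q => String.ofList [q]))).1 = runE d (evts p cs) := by
  induction cs generalizing d p with
  | nil => simp [runE, evts]
  | cons c cs' ih =>
    have hne : ∀ q : Char, ¬ (String.ofList [q] = "") := by
      intro q h; have := congrArg String.toList h; simp at this
    cases p with
    | none =>
      simpa [evts, runE, bump] using ih (d := bump d (String.ofList [c])) (p := some c)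
    | some q =>
      have hq := hne q
      have hkey : String.ofList [q] ++ String.ofList [c] = String.ofList [q, c] :=
        (String.ofList_append (l₁ := [q]) (l₂ := [c])).symm
      simpa [evts, runE, bump, hq, hkey] using
        ih (d := bump (bump d (String.ofList [c])) (String.ofList [q, c])) (p := some c)

-- filter of a Nodup list at a member is the singleton
theorem filter_eq_singleton_of_nodup {α : Type} [DecidableEq α] (l : List α) (v : α)
    (hnd : l.Nodup) (hv : v ∈ l) : l.filter (fun k => k == v) = [v] := by
  induction l with
  | nil => cases hv
  | cons a t ih =>
    rcases List.nodup_cons.mp hnd with ⟨ha, ht⟩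
    by_cases hav : a = v
    · subst hav
      have hz : t.filter (fun k => k == a) = [] :=
        List.filter_eq_nil_iff.mpr (fun b hb hba => ha ((beq_iff_eq.mp hba) ▸ hb))
      simp [hz]
    · have hvt : v ∈ t := by cases hv with | head => exact absurd rfl hav | tail _ h => exact h
      simp [hav, ih ht hvt]

-- Generic value of the Counter-merge fold.
theorem getD_mergeFold (l : List (String × Int)) (acc : PySem.Dict String Int) (v : String) :
    (l.foldl (fun d kv => d.insert kv.1 (d.getD kv.1 0 + kv.2)) acc).getD v 0
      = acc.getD v 0 + ((l.filter (fun kv => kv.1 == v)).map (·.2)).sum := by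
  induction l generalizing acc with
  | nil => simp
  | cons kv t ih =>
    rw [List.foldl_cons, ih, List.filter_cons]
    by_cases h : kv.1 = v
    · subst h
      rw [PySem.Dict.getD_insert_self]
      simp
      ring
    · rw [PySem.Dict.getD_insert_of_ne _ _ _ (fun hh => h hh.symm)]
      simp [h]

-- `Counter += c` where c was built from scratch by the bumps `es` equals performing the bumps on
-- the accumulator directly (same final counts AND the same key order).
theorem merge_runE (es : List String) (acc : PySem.Dict String Int) (hacc : acc.keys.Nodup) :
    (runE PySem.Dict.empty es).items.foldl (fun d kv => d.insert kv.1 (d.getD kv.1 0 + kv.2)) acc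
      = runE acc es := by
  have hcounter : runE PySem.Dict.empty es = PySem.Dict.counter es := rfl
  have hitems : (runE PySem.Dict.empty es).items
      = (PySem.Set.ofList es).map (fun k => (k, (es.count k : Int))) := by
    rw [hcounter, PySem.Dict.items_counter]
  have hLkeys : (runE PySem.Dict.empty es).items.map (·.1) = PySem.Set.ofList es := by
    rw [hitems, List.map_map]
    rw [show ((fun x : String × Int => x.1) ∘ fun k : String => (k, (es.count k : Int))) = id from rfl,
      List.map_id]
  have hknodupL : (((runE PySem.Dict.empty es).items.foldl
      (fun d kv => d.insert kv.1 (d.getD kv.1 0 + kv.2)) acc).keys).Nodup :=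
    PySem.Dict.nodup_keys_foldl_insert_key _ _ _ _ hacc
  have hkeys : ((runE PySem.Dict.empty es).items.foldl
      (fun d kv => d.insert kv.1 (d.getD kv.1 0 + kv.2)) acc).keys = (runE acc es).keys := by
    rw [PySem.Dict.keys_foldl_insert_key, hLkeys, keys_runE,
      PySem.Set.update_eq_append_filter, PySem.Set.update_eq_append_filter, PySem.Set.ofList_ofList]
  have hgetD : ∀ v, ((runE PySem.Dict.empty es).items.foldl
      (fun d kv => d.insert kv.1 (d.getD kv.1 0 + kv.2)) acc).getD v 0 = (runE acc es).getD v 0 := by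
    intro v
    rw [getD_mergeFold, getD_runE, hitems, List.filter_map]
    by_cases hv : v ∈ es
    · have hf : (PySem.Set.ofList es).filter ((fun kv => kv.1 == v) ∘ (fun k => (k, (es.count k : Int))))
          = [v] := by
        have : ((fun kv => kv.1 == v) ∘ (fun k : String => (k, (es.count k : Int)))) = (fun k => k == v) := by
          funext k; simp [Function.comp]
        rw [this]
        exact filter_eq_singleton_of_nodup _ v (PySem.Set.nodup_ofList es)
          ((PySem.Set.mem_ofList es v).mpr hv)
      rw [hf]; simp
    · have hf : (PySem.Set.ofList es).filter ((fun kv => kv.1 == v) ∘ (fun k => (k, (es.count k : Int))))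
          = [] := by
        refine List.filter_eq_nil_iff.mpr (fun k hk => ?_)
        simp only [Function.comp, beq_iff_eq]
        rintro rfl
        exact hv ((PySem.Set.mem_ofList es k).mp hk)
      rw [hf]
      simp [List.count_eq_zero_of_not_mem hv]
  apply PySem.Dict.ext
  rw [PySem.Dict.items_eq_map_keys _ hknodupL 0,
    PySem.Dict.items_eq_map_keys _ (nodup_keys_runE acc es hacc) 0, hkeys]
  exact List.map_congr_left (fun k _ => by rw [hgetD k])

-- B's loop over zipped (prev, ch) pairs performs exactly the bumps of `evts`.
theorem foldB_eval (cs : List Char) (d : PySem.Dict String Int) (p : Option Char) :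
    ((List.zip (p :: cs.map some) cs).foldl
      (fun (d : PySem.Dict String Int) pc =>
        let d1 := d.modify (String.ofList [pc.2]) 0 (· + 1)
        match pc.1 with
        | none => d1
        | some q => d1.modify (String.ofList [q, pc.2]) 0 (· + 1)) d) = runE d (evts p cs) := by
  induction cs generalizing d p with
  | nil => simp [runE, evts]
  | cons c cs' ih =>
    cases p with
    | none => simpa [evts, runE, bump] using ih (d := bump d (String.ofList [c])) (p := some c)
    | some q =>
      simpa [evts, runE, bump] using
        ih (d := bump (bump d (String.ofList [c])) (String.ofList [q, c])) (p := some c)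

-- the last-letter update: line[len(line) - 1] is the last character of a nonempty line
theorem pyGet_last (l : String) (hl : l.toList ≠ []) :
    PySem.Str.pyGet? l (PySem.Str.len l - 1) = some (l.toList.getLast hl) := by
  have hpos : 0 < l.toList.length := List.length_pos_iff.mpr hl
  have h0 : (0 : Int) ≤ (l.toList.length : Int) - 1 := by omega
  rw [PySem.Str.len_eq]
  have : PySem.Str.pyGet? l ((l.toList.length : Int) - 1)
      = PySem.List.pyGet? l.toList ((l.toList.length : Int) - 1) := by
    simp [PySem.Str.pyGet?]
  rw [this, PySem.List.pyGet?_of_nonneg _ h0]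
  have ht : ((l.toList.length : Int) - 1).toNat = l.toList.length - 1 := by omega
  rw [ht, List.getElem?_eq_getElem (by omega), List.getLast_eq_getElem]

-- A's outer loop, on nonempty lines, performs the bumps of the concatenated text.
theorem foldMain_eval (lines : List String) (d : PySem.Dict String Int) (p : Option Char)
    (hd : d.keys.Nodup) (h : ∀ l ∈ lines, l.toList ≠ []) :
    (lines.foldl
      (fun (st : PySem.Dict String Int × Option String) line =>
        let lc := count_line_distribution line st.2
        let merged := lc.items.foldl (fun d kv => d.insert kv.1 (d.getD kv.1 0 + kv.2)) st.1
        (merged, (PySem.Str.pyGet? line (PySem.Str.len line - 1)).map (fun c => String.ofList [c])))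
      (d, p.map (fun q => String.ofList [q]))).1
    = runE d (evts p (lines.flatMap String.toList)) := by
  induction lines generalizing d p with
  | nil => simp [runE, evts]
  | cons l ls ih =>
    have hl : l.toList ≠ [] := h l (by simp)
    have hhelp : count_line_distribution l (p.map (fun q => String.ofList [q]))
        = runE PySem.Dict.empty (evts p l.toList) := by
      unfold count_line_distribution
      exact foldA_eval l.toList PySem.Dict.empty p
    have hmerged : (count_line_distribution l (p.map (fun q => String.ofList [q]))).items.foldl
        (fun d kv => d.insert kv.1 (d.getD kv.1 0 + kv.2)) d = runE d (evts p l.toList) := by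
      rw [hhelp]; exact merge_runE _ _ hd
    rw [List.foldl_cons]
    dsimp only
    rw [hmerged, pyGet_last l hl]
    rw [ih (d := runE d (evts p l.toList)) (p := some (l.toList.getLast hl))
        (nodup_keys_runE d _ hd) (fun x hx => h x (List.mem_cons_of_mem _ hx)),
      List.flatMap_cons, evts_append l.toList _ p hl, runE_append]

-- ''.join(inp) flattens into the concatenation of the lines' characters
theorem join_toList (parts : List String) :
    (PySem.Str.join "" parts).toList = parts.flatMap String.toList := by
  rw [PySem.Str.toList_join]
  show PySem.Chars.join [] (parts.map String.toList) = parts.flatMap String.toList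
  simp only [PySem.Chars.join, List.intercalate, List.flatMap]
  induction parts with
  | nil => simp
  | cons a t ih =>
    cases t with
    | nil => simp
    | cons b t' =>
      simp only [List.map_cons, List.intersperse_cons₂, List.flatten_cons] at ih ⊢
      simp [ih]

-- ===== VERDICT (by name: the statement is the Claim_ definition above) =====
theorem count_distribution_spec : Claim_equal_count_distribution := by
  intro inp _ hpre
  unfold Spec_count_distribution count_distribution count_distribution_alt
  have hA : (inp.foldl
      (fun (st : PySem.Dict String Int × Option String) line =>
        let lc := count_line_distribution line st.2
        let merged := lc.items.foldl (fun d kv => d.insert kv.1 (d.getD kv.1 0 + kv.2)) st.1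
        (merged, (PySem.Str.pyGet? line (PySem.Str.len line - 1)).map (fun c => String.ofList [c])))
      (PySem.Dict.empty, (none : Option String))).1
      = runE PySem.Dict.empty (evts none (inp.flatMap String.toList)) :=
    foldMain_eval inp PySem.Dict.empty none PySem.Dict.nodup_keys_empty hpre
  rw [hA]
  dsimp only
  rw [join_toList]
  rw [foldB_eval (inp.flatMap String.toList) PySem.Dict.empty none]

def count_distribution_raises : Claim_raises_count_distribution := by
  unfold Claim_raises_count_distribution
  refine ⟨?_, by decide, by decide, by decide⟩
  rintro inp _ ⟨l, hl, he⟩ hpre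
  exact (hpre l hl) he
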